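-- pv_equiv track=rewrite | github.com/alexanderbackup/Python-backup | hackbulgaria/week01/ex1_1.py | gas_stations
-- ===== SOURCE A (Python) =====
-- def gas_stations(distance, tank_size, stations):
-- 	travelled = 0
-- 	fuel_left = tank_size
-- 	result = []
-- 	road = stations[:]
-- 	road.append(distance)
-- 	for i in range(len(road)-1):
-- 		fuel_left -= road[i] - travelled
-- 		travelled = road[i]
-- 		if fuel_left < (road[i+1] - road[i]):
-- 			result.append(road[i])
-- 			fuel_left = tank_size
-- 	return result
-- ===== SOURCE B (Python) =====
-- def _next_stop(pairs, last, tank_size):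
--     # First (cur, nxt) pair whose next stop is out of reach from `last`:
--     # return that station and the pairs after it, or None if every stop is reachable.
--     for k, (cur, nxt) in enumerate(pairs):
--         if nxt - last > tank_size:
--             return cur, pairs[k + 1:]
--     return None
--
-- def gas_stations(distance, tank_size, stations):
--     pairs = list(zip(stations, stations[1:] + [distance]))
--     result = []
--     last = 0
--     while True:
--         found = _next_stop(pairs, last, tank_size)
--         if found is None:
--             return result
--         cur, pairs = found
--         result.append(cur)
--         last = cur
-- ===== Notes on version B (the rewrite author's own statement) =====
-- stated objective: alternative
-- what changed: Replaces A's single pass with a running fuel_left accumulator by an outer loop over refuel stops that repeatedly calls an inner search for the first unreachable next stop (comparing positions against the last refuel point) and restarts on the sliced-off suffix, building the result stop by stop.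
import Mathlib
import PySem

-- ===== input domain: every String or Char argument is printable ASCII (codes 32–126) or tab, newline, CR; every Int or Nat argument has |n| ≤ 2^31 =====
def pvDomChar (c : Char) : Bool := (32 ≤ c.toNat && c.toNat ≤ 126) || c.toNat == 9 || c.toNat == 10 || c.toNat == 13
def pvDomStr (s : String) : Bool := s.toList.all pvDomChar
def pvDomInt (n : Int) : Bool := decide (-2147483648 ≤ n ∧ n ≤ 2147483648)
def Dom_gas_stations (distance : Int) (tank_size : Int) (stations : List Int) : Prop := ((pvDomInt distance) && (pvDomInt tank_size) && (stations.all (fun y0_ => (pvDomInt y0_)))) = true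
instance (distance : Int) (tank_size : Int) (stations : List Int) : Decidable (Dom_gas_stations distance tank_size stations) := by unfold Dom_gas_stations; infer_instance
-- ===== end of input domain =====

-- B replaces A's one-pass fuel_left accumulator with an outer loop over refuel stops
-- and an inner search for the first unreachable next stop on the remaining suffix
-- (alternative decomposition; same result, no speed claim).

-- ===== PORT A =====
def gas_stations (distance : Int) (tank_size : Int) (stations : List Int) : List Int :=
  let road := stations ++ [distance]
  let st :=
    (PySem.List.pyRange 0 ((road.length : Int) - 1) 1).foldl
      (fun (s : Int × Int × List Int) i =>
        let travelled := s.1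
        let fuel_left := s.2.1
        let result := s.2.2
        let fuel_left := fuel_left - (PySem.List.pyGetD road i 0 - travelled)
        let travelled := PySem.List.pyGetD road i 0
        if fuel_left < PySem.List.pyGetD road (i + 1) 0 - PySem.List.pyGetD road i 0 then
          (travelled, tank_size, result ++ [PySem.List.pyGetD road i 0])
        else
          (travelled, fuel_left, result))
      (0, tank_size, [])
  st.2.2

-- ===== PORT B =====
-- inner search (_next_stop in Source B): first pair (cur, nxt) with nxt - last > tank_size,
-- returning that station and the pairs after it
def findStop (tank_size last : Int) : List (Int × Int) → Option (Int × List (Int × Int))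
  | [] => none
  | p :: rest => if p.2 - last > tank_size then some (p.1, rest) else findStop tank_size last rest

-- termination of the outer loop: the suffix returned by the inner search is shorter
theorem findStop_length (t l : Int) :
    ∀ (ps : List (Int × Int)) (c : Int) (rest : List (Int × Int)),
      findStop t l ps = some (c, rest) → rest.length < ps.length := by
  intro ps
  induction ps with
  | nil => intro c rest h; simp [findStop] at h
  | cons p xs ih =>
      intro c rest h
      by_cases hc : p.2 - l > t
      · simp [findStop, hc] at h
        simp [h.2.symm]
      · simp [findStop, hc] at h
        exact Nat.lt_trans (ih c rest h) (by simp)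

-- outer while loop of Source B, as recursion on the shrinking pairs suffix
def goStops (tank_size last : Int) (pairs : List (Int × Int)) : List Int :=
  match h : findStop tank_size last pairs with
  | none => []
  | some (c, rest) => c :: goStops tank_size c rest
termination_by pairs.length
decreasing_by exact findStop_length _ _ _ _ _ h

def gas_stations_alt (distance : Int) (tank_size : Int) (stations : List Int) : List Int :=
  goStops tank_size 0 (stations.zip (stations.drop 1 ++ [distance]))

-- ===== PRECONDITION & SPEC =====
def Spec_gas_stations (distance : Int) (tank_size : Int) (stations : List Int) (out : List Int) : Prop := out = gas_stations_alt distance tank_size stations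
instance (distance : Int) (tank_size : Int) (stations : List Int) (out : List Int) : Decidable (Spec_gas_stations distance tank_size stations out) := by unfold Spec_gas_stations; infer_instance

-- ===== CLAIM (what is proved, stated in full; the proofs are below) =====
def Claim_equal_gas_stations : Prop := ∀ (distance : Int) (tank_size : Int) (stations : List Int), Dom_gas_stations distance tank_size stations → Spec_gas_stations distance tank_size stations (gas_stations distance tank_size stations)

-- ===== LEMMAS AND PROOFS =====

-- A's index loop over `road`, seen as a fold over adjacent pairs of `road`.
theorem foldl_pyRange_adj {σ : Type} (f : σ → Int → Int → σ) :
    ∀ (k : Nat) (xs : List Int) (a : Nat) (init : σ), a + k + 1 = xs.length →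
      (PySem.List.pyRange (a : Int) ((xs.length : Int) - 1) 1).foldl
          (fun s i => f s (PySem.List.pyGetD xs i 0) (PySem.List.pyGetD xs (i + 1) 0)) init
        = ((xs.drop a).zip (xs.drop (a + 1))).foldl (fun s p => f s p.1 p.2) init := by
  intro k
  induction k with
  | zero =>
      intro xs a init h
      rw [PySem.List.pyRange_one_eq_nil (by omega)]
      have h1 : xs.drop (a + 1) = [] := List.drop_eq_nil_of_le (by omega)
      simp [h1]
  | succ k ih =>
      intro xs a init h
      rw [PySem.List.pyRange_one_cons (by omega)]
      have ha : a < xs.length := by omega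
      have ha1 : a + 1 < xs.length := by omega
      have hd : xs.drop a = xs[a] :: xs.drop (a + 1) := List.drop_eq_getElem_cons ha
      have hd1 : xs.drop (a + 1) = xs[a + 1] :: xs.drop (a + 2) := List.drop_eq_getElem_cons ha1
      have g1 : PySem.List.pyGetD xs (a : Int) 0 = xs[a] := by
        rw [PySem.List.pyGetD_natCast, List.getD_eq_getElem xs 0 ha]
      have g2 : PySem.List.pyGetD xs ((a : Int) + 1) 0 = xs[a + 1] := by
        have : ((a : Int) + 1) = ((a + 1 : Nat) : Int) := by push_cast; ring
        rw [this, PySem.List.pyGetD_natCast, List.getD_eq_getElem xs 0 ha1]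
      have hstep : ((a : Int) + 1) = (((a + 1 : Nat)) : Int) := by push_cast; ring
      have hzip : (xs.drop a).zip (xs.drop (a + 1))
          = (xs[a], xs[a + 1]) :: (xs.drop (a + 1)).zip (xs.drop (a + 2)) := by
        rw [congrArg₂ List.zip hd hd1]; rfl
      rw [List.foldl_cons, g1, g2, hstep, ih xs (a + 1) _ (by omega), hzip, List.foldl_cons]

-- zipping road = stations ++ [distance] with its tail gives B's pair list.
theorem zip_road (d : Int) :
    ∀ (xs : List Int),
      (xs ++ [d]).zip ((xs ++ [d]).drop 1) = xs.zip (xs.drop 1 ++ [d]) := by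
  intro xs
  induction xs with
  | nil => simp
  | cons x ys ih =>
      cases ys with
      | nil => simp
      | cons z zs => simpa using ih

-- unfolding equations for goStops
theorem goStops_pos (t l : Int) (p : Int × Int) (rest : List (Int × Int)) (h : p.2 - l > t) :
    goStops t l (p :: rest) = p.1 :: goStops t p.1 rest := by
  rw [goStops]
  split
  · next heq => simp [findStop, h] at heq
  · next c r heq =>
      simp only [findStop, if_pos h, Option.some.injEq, Prod.mk.injEq] at heq
      rw [heq.1, heq.2]

theorem goStops_neg (t l : Int) (p : Int × Int) (rest : List (Int × Int)) (h : ¬ p.2 - l > t) :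
    goStops t l (p :: rest) = goStops t l rest := by
  conv_lhs => rw [goStops]
  conv_rhs => rw [goStops]
  have he : findStop t l (p :: rest) = findStop t l rest := by
    simp only [findStop, if_neg h]
  split
  · next heq =>
      rw [he] at heq
      split
      · rfl
      · next c r heq2 => rw [heq] at heq2; exact absurd heq2 (by simp)
  · next c r heq =>
      rw [he] at heq
      split
      · next heq2 => rw [heq] at heq2; exact absurd heq2 (by simp)
      · next c2 r2 heq2 =>
          rw [heq] at heq2
          simp only [Option.some.injEq, Prod.mk.injEq] at heq2
          rw [heq2.1, heq2.2]

theorem goStops_nil (t l : Int) : goStops t l [] = [] := by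
  rw [goStops]
  split
  · rfl
  · next c r heq => exact absurd heq (by simp [findStop])

-- Core invariant: A's fuel_left is always tank_size - (travelled - last_fill), so A's fold
-- over adjacent pairs appends exactly the stops B's search-and-recurse produces.
theorem fold_equiv (tank_size : Int) :
    ∀ (ps : List (Int × Int)) (travelled last_fill : Int) (res : List Int),
      (ps.foldl
          (fun (s : Int × Int × List Int) p =>
            let fuel_left := s.2.1 - (p.1 - s.1)
            if fuel_left < p.2 - p.1 then (p.1, tank_size, s.2.2 ++ [p.1])
            else (p.1, fuel_left, s.2.2))
          (travelled, tank_size - (travelled - last_fill), res)).2.2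
        = res ++ goStops tank_size last_fill ps := by
  intro ps
  induction ps with
  | nil => intro travelled last_fill res; simp [goStops_nil]
  | cons p rest ih =>
      intro travelled last_fill res
      simp only [List.foldl_cons]
      by_cases hc : p.2 - last_fill > tank_size
      · rw [if_pos (by omega), goStops_pos _ _ _ _ hc]
        have h := ih p.1 p.1 (res ++ [p.1])
        rw [show tank_size - (p.1 - p.1) = tank_size from by ring] at h
        simpa using h
      · rw [if_neg (by omega), goStops_neg _ _ _ _ hc]
        have h := ih p.1 last_fill res
        rw [show tank_size - (p.1 - last_fill)
            = tank_size - (travelled - last_fill) - (p.1 - travelled) from by ring] at h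
        exact h

-- ===== VERDICT (by name: the statement is the Claim_ definition above) =====
theorem gas_stations_spec : Claim_equal_gas_stations := by
  intro distance tank_size stations _
  unfold Spec_gas_stations gas_stations gas_stations_alt
  simp only []
  have hlen : 0 + stations.length + 1 = (stations ++ [distance]).length := by simp
  have hadj := foldl_pyRange_adj
    (fun (s : Int × Int × List Int) (c n : Int) =>
      let fuel_left := s.2.1 - (c - s.1)
      if fuel_left < n - c then (c, tank_size, s.2.2 ++ [c])
      else (c, fuel_left, s.2.2))
    stations.length (stations ++ [distance]) 0 (0, tank_size, ([] : List Int)) hlen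
  simp only [Nat.cast_zero] at hadj
  rw [hadj, List.drop_zero, zero_add, zip_road distance stations]
  have := fold_equiv tank_size (stations.zip (stations.drop 1 ++ [distance])) 0 0 []
  simpa using this
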